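-- pv_equiv track=rewrite | github.com/tyawanmusi256/CompetitiveProgramming | VirtualContest/UECCP20250414/f.py | f
-- ===== SOURCE A (Python) =====
-- def f(n,c):
--     x=n
--     while 1:
--         y=x
--         count=0
--         while y!=0:
--             count+=y//n
--             y//=n
--             if count>=c:
--                 return x
--         x+=n
-- ===== SOURCE B (Python) =====
-- def f(n, c):
--     # smallest positive multiple x of n whose Legendre-style sum
--     # sum_{i>=1} x // n**i reaches c; binary search on the multiple index.
--     if n == 1:
--         return 1
--
--     def s(x):
--         t = 0
--         while x:
--             x //= n
--             t += x
--         return t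
--
--     lo, hi = 1, max(1, c)          # s(hi * n) >= hi >= c always holds
--     while lo < hi:
--         mid = (lo + hi) // 2
--         if s(mid * n) >= c:
--             hi = mid
--         else:
--             lo = mid + 1
--     return lo * n
-- ===== Notes on version B (the rewrite author's own statement) =====
-- stated objective: faster
-- what changed: Replaces A's linear scan over successive multiples of n with a binary search on the multiple index k (the digit-sum s(k*n) is monotone in k), with n=1 answered directly; Pre_ restricts to the natural domain n >= 1 (A loops forever on n = 0 and on n = -1 with c >= 2, and negative n is outside the Legendre-sum setting).
-- outside the precondition, e.g. on f(-2, 2): A returns -4, B returns -4; on f(0, 3): A does not finish within the time limit, B returns 0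
import Mathlib
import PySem

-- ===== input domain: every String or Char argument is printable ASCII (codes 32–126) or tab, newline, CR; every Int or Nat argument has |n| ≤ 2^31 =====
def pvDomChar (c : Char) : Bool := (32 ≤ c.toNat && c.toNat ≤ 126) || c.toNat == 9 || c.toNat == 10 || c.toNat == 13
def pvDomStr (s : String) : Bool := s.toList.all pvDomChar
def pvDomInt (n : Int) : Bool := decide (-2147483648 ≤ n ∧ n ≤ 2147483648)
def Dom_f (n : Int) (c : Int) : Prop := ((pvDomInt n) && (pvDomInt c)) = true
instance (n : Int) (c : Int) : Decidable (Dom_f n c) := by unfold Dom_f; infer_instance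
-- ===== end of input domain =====

-- B replaces A's linear scan over the multiples of n by a binary search on the
-- multiple index (the digit sum is monotone), answering n = 1 directly: faster.

-- ===== PORT A =====
-- Inner 'while y != 0' loop of A.  The 'n ≤ 0 ∨ y < 0' test is a totality
-- guard only: for n ≥ 1 the loop is entered with y = x ≥ n ≥ 1 and y stays ≥ 0,
-- so the guard never fires on inputs admitted by Pre_f.
def innerA (n c x y count : Int) : Option Int :=
  if y = 0 then none
  else if n ≤ 0 ∨ y < 0 then none
  else if c ≤ count + PySem.Int.floordiv y n then some x
  else innerA n c x (PySem.Int.floordiv y n) (count + PySem.Int.floordiv y n)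
termination_by (y.toNat + (c - count).toNat)
decreasing_by
  rename_i h0 hg hc
  have hn : 1 ≤ n := by omega
  have hy : 1 ≤ y := by omega
  have he : PySem.Int.floordiv y n = y / n :=
    PySem.Int.floordiv_eq_ediv_of_pos (by omega)
  have h1 : 0 ≤ y / n := Int.ediv_nonneg (by omega) (by omega)
  have h2 : y / n ≤ y := Int.ediv_le_self _ (by omega)
  rw [he] at hc ⊢
  omega

-- Outer 'while 1' loop of A.  The bound 'x + n ≤ n * max 1 c' is a totality
-- guard only: for n ≥ 1 the inner loop always succeeds before the bound is
-- reached (proved below), so the 'else x' branch is never taken under Pre_f.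
def outerA (n c x : Int) : Int :=
  match innerA n c x x 0 with
  | some r => r
  | none => if h : 1 ≤ n ∧ x + n ≤ n * max 1 c then outerA n c (x + n) else x
termination_by (n * max 1 c - x).toNat
decreasing_by
  obtain ⟨h1, h2⟩ := h
  generalize n * max 1 c = B at h2 ⊢
  omega

def f (n : Int) (c : Int) : Int := outerA n c n

-- ===== PORT B =====
-- termination helper for the digit-sum loops
theorem pv_ediv_lt (a b : Int) (h : 0 < a) (h2 : 1 < b) : a / b < a := by
  have := Int.ediv_lt_iff_lt_mul (a := a) (b := a) (c := b) (by omega)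
  nlinarith [this.mpr (by nlinarith)]

-- Source B's helper s: t accumulates x//n + x//n^2 + …  ('n ≤ 1 ∨ x < 0' is a
-- totality guard; B only calls it with n ≥ 2 and x ≥ 0).
def sB (n x t : Int) : Int :=
  if x = 0 then t
  else if n ≤ 1 ∨ x < 0 then t
  else sB n (PySem.Int.floordiv x n) (t + PySem.Int.floordiv x n)
termination_by x.toNat
decreasing_by
  rename_i h0 hg
  have he : PySem.Int.floordiv x n = x / n :=
    PySem.Int.floordiv_eq_ediv_of_pos (by omega)
  have h2 : x / n < x := pv_ediv_lt x n (by omega) (by omega)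
  have h1 : 0 ≤ x / n := Int.ediv_nonneg (by omega) (by omega)
  rw [he]
  omega

-- Source B's 'while lo < hi' binary-search loop.
def bsB (n c lo hi : Int) : Int :=
  if hi ≤ lo then lo
  else if c ≤ sB n (PySem.Int.floordiv (lo + hi) 2 * n) 0 then
    bsB n c lo (PySem.Int.floordiv (lo + hi) 2)
  else
    bsB n c (PySem.Int.floordiv (lo + hi) 2 + 1) hi
termination_by (hi - lo).toNat
decreasing_by
  · have hm := PySem.Int.floordiv_two_mid_bounds (lo := lo) (hi := hi) (by omega)
    have hlt : PySem.Int.floordiv (lo + hi) 2 < hi :=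
      (PySem.Int.floordiv_lt_iff_lt_mul (by omega)).mpr (by omega)
    omega
  · have hm := PySem.Int.floordiv_two_mid_bounds (lo := lo) (hi := hi) (by omega)
    omega

def f_alt (n : Int) (c : Int) : Int :=
  if n = 1 then 1
  else bsB n c 1 (max 1 c) * n

-- ===== PRECONDITION & SPEC =====
-- Pre_f restricts to the natural domain n ≥ 1 of the Legendre-style sum:
-- A loops forever on n = 0 and on n = -1 (for c ≥ 2), and negative n is
-- outside the function's purpose (on n ≤ -2 A happens to return; excluded as
-- outside the natural domain).
def Pre_f (n : Int) (c : Int) : Prop := 1 ≤ n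
instance (n : Int) (c : Int) : Decidable (Pre_f n c) := by unfold Pre_f; infer_instance
def pvWitness_f : Int × Int := (2, 3)

def Spec_f (n : Int) (c : Int) (out : Int) : Prop := out = f_alt n c
instance (n : Int) (c : Int) (out : Int) : Decidable (Spec_f n c out) := by unfold Spec_f; infer_instance

-- ===== CLAIM (what is proved, stated in full; the proofs are below) =====
def Claim_equal_f : Prop := ∀ (n : Int) (c : Int), Dom_f n c → Pre_f n c → Spec_f n c (f n c)

-- ===== LEMMAS AND PROOFS =====

-- evaluation lemmas for sB's three branches
theorem sB_zero (n t : Int) : sB n 0 t = t := by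
  rw [sB]; simp

theorem sB_rec (n x t : Int) (hn : 2 ≤ n) (hx : 1 ≤ x) :
    sB n x t = sB n (x / n) (t + x / n) := by
  rw [sB, if_neg (by omega), if_neg (by omega),
    PySem.Int.floordiv_eq_ediv_of_pos (show (0:Int) < n by omega)]

-- the accumulator of sB is additive
theorem sB_shift (m : Nat) : ∀ (n x t : Int), x.toNat ≤ m → sB n x t = t + sB n x 0 := by
  induction m with
  | zero =>
    intro n x t hm
    by_cases h0 : x = 0
    · subst h0; rw [sB_zero, sB_zero]; ring
    · have hx : x < 0 := by omega
      rw [sB, if_neg h0, if_pos (Or.inr hx), sB, if_neg h0, if_pos (Or.inr hx)]; ring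
  | succ m ih =>
    intro n x t hm
    by_cases h0 : x = 0
    · subst h0; rw [sB_zero, sB_zero]; ring
    · by_cases hg : n ≤ 1 ∨ x < 0
      · rw [sB, if_neg h0, if_pos hg, sB, if_neg h0, if_pos hg]; ring
      · have hn : 2 ≤ n := by omega
        have hx : 1 ≤ x := by omega
        have hlt : x / n < x := pv_ediv_lt x n (by omega) (by omega)
        have hge : 0 ≤ x / n := Int.ediv_nonneg (by omega) (by omega)
        rw [sB_rec n x t hn hx, sB_rec n x 0 hn hx]
        rw [ih n (x / n) (t + x / n) (by omega), ih n (x / n) (0 + x / n) (by omega)]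
        ring

theorem sB_nonneg (m : Nat) : ∀ (n x : Int), 2 ≤ n → 0 ≤ x → x.toNat ≤ m → 0 ≤ sB n x 0 := by
  induction m with
  | zero =>
    intro n x hn hx hm
    have h0 : x = 0 := by omega
    subst h0; rw [sB_zero]
  | succ m ih =>
    intro n x hn hx hm
    by_cases h0 : x = 0
    · subst h0; rw [sB_zero]
    · have hx1 : 1 ≤ x := by omega
      have hlt : x / n < x := pv_ediv_lt x n (by omega) (by omega)
      have hge : 0 ≤ x / n := Int.ediv_nonneg (by omega) (by omega)
      rw [sB_rec n x 0 hn hx1, sB_shift (x / n).toNat n (x / n) (0 + x / n) (le_refl _)]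
      have := ih n (x / n) hn hge (by omega)
      omega

theorem sB_nonneg' (n x : Int) (hn : 2 ≤ n) (hx : 0 ≤ x) : 0 ≤ sB n x 0 :=
  sB_nonneg x.toNat n x hn hx (le_refl _)

-- one unfolding of sB for n ≥ 2, x ≥ 1
theorem sB_step (n x : Int) (hn : 2 ≤ n) (hx : 1 ≤ x) :
    sB n x 0 = x / n + sB n (x / n) 0 := by
  rw [sB_rec n x 0 hn hx, sB_shift (x / n).toNat n (x / n) (0 + x / n) (le_refl _)]
  ring

theorem sB_mono (m : Nat) : ∀ (n x y : Int), 2 ≤ n → 0 ≤ x → x ≤ y → y.toNat ≤ m →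
    sB n x 0 ≤ sB n y 0 := by
  induction m with
  | zero =>
    intro n x y hn hx hxy hm
    have hx0 : x = 0 := by omega
    have hy0 : y = 0 := by omega
    subst hx0; subst hy0; omega
  | succ m ih =>
    intro n x y hn hx hxy hm
    by_cases h0 : x = 0
    · subst h0
      rw [sB_zero]
      exact sB_nonneg' n y hn (by omega)
    · have hx1 : 1 ≤ x := by omega
      have hy1 : 1 ≤ y := by omega
      rw [sB_step n x hn hx1, sB_step n y hn hy1]
      have hd : x / n ≤ y / n := Int.ediv_le_ediv (by omega) hxy
      have hlt : y / n < y := pv_ediv_lt y n (by omega) (by omega)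
      have hge : 0 ≤ x / n := Int.ediv_nonneg (by omega) (by omega)
      have := ih n (x / n) (y / n) hn hge hd (by omega)
      omega

-- s(k*n) ≥ k
theorem sB_lower (n k : Int) (hn : 2 ≤ n) (hk : 1 ≤ k) : k ≤ sB n (k * n) 0 := by
  have hkn : 1 ≤ k * n := by nlinarith
  rw [sB_step n (k * n) hn hkn]
  have hc : k * n / n = k := Int.mul_ediv_cancel k (by omega)
  rw [hc]
  have := sB_nonneg' n k hn (by omega)
  omega

-- A's inner loop succeeds iff count plus the remaining digit sum reaches c
theorem innerA_char (m : Nat) : ∀ (n c x y count : Int), 2 ≤ n → 0 ≤ y → y.toNat ≤ m →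
    innerA n c x y count =
      if c ≤ count + sB n y 0 ∧ y ≠ 0 then some x else none := by
  induction m with
  | zero =>
    intro n c x y count hn hy hm
    have h0 : y = 0 := by omega
    subst h0
    rw [innerA]; simp
  | succ m ih =>
    intro n c x y count hn hy hm
    by_cases h0 : y = 0
    · subst h0; rw [innerA]; simp
    · have hy1 : 1 ≤ y := by omega
      have he : PySem.Int.floordiv y n = y / n :=
        PySem.Int.floordiv_eq_ediv_of_pos (by omega)
      have hlt : y / n < y := pv_ediv_lt y n (by omega) (by omega)
      have hge : 0 ≤ y / n := Int.ediv_nonneg (by omega) (by omega)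
      have hs := sB_step n y hn hy1
      have hnn := sB_nonneg' n (y / n) hn hge
      rw [innerA, if_neg h0, if_neg (show ¬(n ≤ 0 ∨ y < 0) by omega), he]
      by_cases hc : c ≤ count + y / n
      · rw [if_pos hc, if_pos (show c ≤ count + sB n y 0 ∧ y ≠ 0 from ⟨by omega, h0⟩)]
      · rw [if_neg hc, ih n c x (y / n) (count + y / n) hn hge (by omega)]
        by_cases hz : y / n = 0
        · rw [hz] at hs; rw [sB_zero] at hs
          rw [if_neg (fun h => h.2 hz),
            if_neg (show ¬(c ≤ count + sB n y 0 ∧ y ≠ 0) by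
              rintro ⟨ha, -⟩; apply hc; omega)]
        · have hiff : (c ≤ count + y / n + sB n (y / n) 0 ∧ y / n ≠ 0) ↔
              (c ≤ count + sB n y 0 ∧ y ≠ 0) :=
            ⟨fun h => ⟨by omega, h0⟩, fun h => ⟨by omega, hz⟩⟩
          exact if_congr hiff rfl rfl

-- A's inner loop always succeeds for n = 1 at y = 1
theorem innerA_one (m : Nat) : ∀ (c x count : Int), (c - count).toNat ≤ m →
    innerA 1 c x 1 count = some x := by
  induction m with
  | zero =>
    intro c x count hm
    rw [innerA]
    have he : PySem.Int.floordiv 1 1 = 1 := by decide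
    rw [he]
    split_ifs with h1 h2 h3 <;> first | rfl | omega
  | succ m ih =>
    intro c x count hm
    rw [innerA]
    have he : PySem.Int.floordiv 1 1 = 1 := by decide
    rw [he]
    split_ifs with h1 h2 h3
    · omega
    · omega
    · rfl
    · exact ih c x (count + 1) (by omega)

-- A's outer loop: from multiple index j with no earlier success, it returns
-- the least multiple index r ≥ j whose digit sum reaches c
theorem outerA_char (m : Nat) : ∀ (n c j : Int), 2 ≤ n → 1 ≤ j → j ≤ max 1 c →
    (max 1 c - j).toNat ≤ m →
    (∀ k, 1 ≤ k → k < j → ¬ c ≤ sB n (k * n) 0) →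
    ∃ r, outerA n c (j * n) = r * n ∧ 1 ≤ r ∧ c ≤ sB n (r * n) 0 ∧
      (∀ k, 1 ≤ k → k < r → ¬ c ≤ sB n (k * n) 0) := by
  induction m with
  | zero =>
    intro n c j hn hj hjK hm hmin
    -- j = max 1 c here; show the inner loop succeeds
    have hjK' : j = max 1 c := by omega
    have hP : c ≤ sB n (j * n) 0 := by
      have h1 := sB_lower n j hn hj
      have : c ≤ j := by omega
      omega
    have hjn : 1 ≤ j * n := by nlinarith
    rw [outerA, innerA_char (j * n).toNat n c (j * n) (j * n) 0 hn (by omega) (le_refl _)]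
    rw [if_pos ⟨by omega, by omega⟩]
    exact ⟨j, rfl, hj, hP, hmin⟩
  | succ m ih =>
    intro n c j hn hj hjK hm hmin
    have hjn : 1 ≤ j * n := by nlinarith
    rw [outerA, innerA_char (j * n).toNat n c (j * n) (j * n) 0 hn (by omega) (le_refl _)]
    by_cases hP : c ≤ sB n (j * n) 0
    · rw [if_pos ⟨by omega, by omega⟩]
      exact ⟨j, rfl, hj, hP, hmin⟩
    · rw [if_neg (by intro ⟨h1, _⟩; exact hP (by omega))]
      have hjc : j < c := by
        have := sB_lower n j hn hj
        omega
      have hK : max 1 c = c := by omega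
      have hguard : 1 ≤ n ∧ j * n + n ≤ n * max 1 c := by
        constructor
        · omega
        · have : (j + 1) * n ≤ max 1 c * n :=
            mul_le_mul_of_nonneg_right (by omega) (by omega)
          nlinarith [this]
      rw [dif_pos hguard]
      have hxn : j * n + n = (j + 1) * n := by ring
      rw [hxn]
      have hmin' : ∀ k, 1 ≤ k → k < j + 1 → ¬ c ≤ sB n (k * n) 0 := by
        intro k hk1 hk2
        by_cases hkj : k = j
        · subst hkj; exact hP
        · exact hmin k hk1 (by omega)
      exact ih n c (j + 1) hn (by omega) (by omega) (by omega) hmin'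

-- B's binary search returns the least multiple index in [lo, hi] whose digit
-- sum reaches c, given the invariant
theorem bsB_char (m : Nat) : ∀ (n c lo hi : Int), 2 ≤ n → 1 ≤ lo → lo ≤ hi →
    (hi - lo).toNat ≤ m →
    c ≤ sB n (hi * n) 0 →
    (∀ k, 1 ≤ k → k < lo → ¬ c ≤ sB n (k * n) 0) →
    lo ≤ bsB n c lo hi ∧ bsB n c lo hi ≤ hi ∧ c ≤ sB n (bsB n c lo hi * n) 0 ∧
      (∀ k, 1 ≤ k → k < bsB n c lo hi → ¬ c ≤ sB n (k * n) 0) := by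
  induction m with
  | zero =>
    intro n c lo hi hn hlo hlohi hm hP hmin
    have : hi = lo := by omega
    subst this
    rw [bsB, if_pos (le_refl _)]
    exact ⟨le_refl _, le_refl _, hP, hmin⟩
  | succ m ih =>
    intro n c lo hi hn hlo hlohi hm hP hmin
    by_cases hle : hi ≤ lo
    · have : hi = lo := by omega
      subst this
      rw [bsB, if_pos (le_refl _)]
      exact ⟨le_refl _, le_refl _, hP, hmin⟩
    · rw [bsB, if_neg hle]
      have hmid := PySem.Int.floordiv_two_mid_bounds (lo := lo) (hi := hi) (by omega)
      set mid := PySem.Int.floordiv (lo + hi) 2 with hmiddef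
      have hmidlt : mid < hi := by
        have : PySem.Int.floordiv (lo + hi) 2 < hi ↔ lo + hi < hi * 2 :=
          PySem.Int.floordiv_lt_iff_lt_mul (by omega)
        omega
      split_ifs with hc
      · -- search [lo, mid]
        have h := ih n c lo mid hn hlo (by omega) (by omega) hc hmin
        exact ⟨h.1, by omega, h.2.2.1, h.2.2.2⟩
      · -- search [mid+1, hi]
        have hmin' : ∀ k, 1 ≤ k → k < mid + 1 → ¬ c ≤ sB n (k * n) 0 := by
          intro k hk1 hk2 hck
          by_cases hkl : k < lo
          · exact hmin k hk1 hkl hck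
          · apply hc
            have hkm : k * n ≤ mid * n :=
              mul_le_mul_of_nonneg_right (by omega) (by omega)
            have := sB_mono (mid * n).toNat n (k * n) (mid * n) hn (by nlinarith) hkm (le_refl _)
            omega
        have h := ih n c (mid + 1) hi hn (by omega) (by omega) (by omega) hP hmin'
        exact ⟨by omega, h.2.1, h.2.2.1, h.2.2.2⟩

-- ===== VERDICT (by name: the statement is the Claim_ definition above) =====
theorem f_spec : Claim_equal_f := by
  intro n c _ hpre
  unfold Spec_f f f_alt Pre_f at *
  by_cases h1 : n = 1
  · subst h1
    rw [if_pos rfl, outerA, innerA_one (c - 0).toNat c 1 0 (le_refl _)]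
  · have hn : 2 ≤ n := by omega
    rw [if_neg h1]
    have hA := outerA_char (max 1 c - 1).toNat n c 1 hn (le_refl _) (le_max_left _ _)
      (le_refl _) (by intro k hk1 hk2; omega)
    obtain ⟨r, hAr, hr1, hrP, hrmin⟩ := hA
    have hPK : c ≤ sB n (max 1 c * n) 0 := by
      have := sB_lower n (max 1 c) hn (le_max_left _ _)
      have : c ≤ max 1 c := le_max_right _ _
      omega
    have hB := bsB_char (max 1 c - 1).toNat n c 1 (max 1 c) hn (le_refl _)
      (le_max_left _ _) (le_refl _) hPK (by intro k hk1 hk2; omega)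
    obtain ⟨hb1, hb2, hbP, hbmin⟩ := hB
    rw [one_mul] at hAr
    rw [hAr]
    -- r = bsB n c 1 (max 1 c)
    have : r = bsB n c 1 (max 1 c) := by
      rcases lt_trichotomy r (bsB n c 1 (max 1 c)) with h | h | h
      · exact absurd hrP (hbmin r hr1 h)
      · exact h
      · exact absurd hbP (hrmin _ hb1 h)
    rw [this]
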